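-- pv_equiv track=rewrite | github.com/RCNR/algorithms | Baekjoon/15000/화살표 그리기.py | func
-- ===== SOURCE A (Python) =====
-- def func(l):
--   res = 0
--   for i in range(len(l)):
--     if i == 0:
--       res += abs(l[i] - l[i+1])
--
--     elif i == len(l) - 1:
--       res += abs(l[i] - l[i-1])
--
--     else:
--       res += min(abs(l[i] - l[i-1]), abs(l[i] - l[i+1]))
--
--   return res
-- ===== SOURCE B (Python) =====
-- def func(l):
--   total = 0
--   mx = 0
--   prev = None
--   for a, b in zip(l, l[1:]):
--     g = abs(b - a)
--     total += g
--     if prev is not None: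
--       mx += max(prev, g)
--     prev = g
--   return 2 * total - mx
-- ===== Notes on version B (the rewrite author's own statement) =====
-- stated objective: alternative
-- what changed: B computes the result by the identity res = 2*(sum of adjacent gaps) - (sum of maxima of consecutive gap pairs), in one fold over zip(l, l[1:]) carrying (total, max-sum, previous gap), instead of A's per-element min-distance-to-nearest-neighbor with index branching.
import Mathlib
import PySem

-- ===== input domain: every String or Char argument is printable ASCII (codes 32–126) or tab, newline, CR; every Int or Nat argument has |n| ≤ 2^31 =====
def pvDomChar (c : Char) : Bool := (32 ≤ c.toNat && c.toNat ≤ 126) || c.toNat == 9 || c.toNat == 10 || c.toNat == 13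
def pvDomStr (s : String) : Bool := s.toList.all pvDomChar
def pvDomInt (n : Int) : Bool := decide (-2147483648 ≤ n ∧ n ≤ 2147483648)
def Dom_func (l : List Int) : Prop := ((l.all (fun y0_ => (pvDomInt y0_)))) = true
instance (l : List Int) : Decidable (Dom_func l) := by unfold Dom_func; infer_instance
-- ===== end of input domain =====

-- B computes 2*(sum of adjacent gaps) - (sum of maxima of consecutive gap pairs) in one
-- fold over zip(l, l[1:]), instead of A's per-element min-distance-to-neighbor branching;
-- objective: alternative (same O(n) cost, different formula and loop shape).


-- ===== PORT A =====
-- l[i±1] is ported as pyGetD … 0: under Pre_func every access A performs is in range, so this is exact.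
def func (l : List Int) : Int :=
  (PySem.List.pyRange 0 (l.length : Int) 1).foldl (fun res i =>
    if i = 0 then
      res + |PySem.List.pyGetD l i 0 - PySem.List.pyGetD l (i + 1) 0|
    else if i = (l.length : Int) - 1 then
      res + |PySem.List.pyGetD l i 0 - PySem.List.pyGetD l (i - 1) 0|
    else
      res + min |PySem.List.pyGetD l i 0 - PySem.List.pyGetD l (i - 1) 0|
              |PySem.List.pyGetD l i 0 - PySem.List.pyGetD l (i + 1) 0|) 0

-- ===== PORT B =====
-- zip(l, l[1:]) is l.zip (slice l 1 none); the loop state (total, mx, prev) is the fold state.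
def func_alt (l : List Int) : Int :=
  let r := (l.zip (PySem.List.slice l (some 1) none)).foldl
    (fun st p =>
      let g := |p.2 - p.1|
      (st.1 + g,
       (match st.2.2 with
        | some prev => st.2.1 + max prev g
        | none => st.2.1),
       some g))
    ((0 : Int), (0 : Int), (none : Option Int))
  2 * r.1 - r.2.1

-- ===== PRECONDITION & SPEC =====
-- Pre_func excludes exactly the one-element lists, on which A raises IndexError (l[1]).
def Pre_func (l : List Int) : Prop := l.length ≠ 1
instance (l : List Int) : Decidable (Pre_func l) := by unfold Pre_func; infer_instance
def pvWitness_func : List Int := [3, 7, 4]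

def Spec_func (l : List Int) (out : Int) : Prop := out = func_alt l
instance (l : List Int) (out : Int) : Decidable (Spec_func l out) := by unfold Spec_func; infer_instance

-- ===== CLAIM (what is proved, stated in full; the proofs are below) =====
def Claim_equal_func : Prop := ∀ (l : List Int), Dom_func l → Pre_func l → Spec_func l (func l)

-- ===== LEMMAS AND PROOFS =====

-- the fold state transformer of B, on the gap value alone
def pvStep (st : Int × Int × Option Int) (g : Int) : Int × Int × Option Int :=
  (st.1 + g,
   (match st.2.2 with
    | some prev => st.2.1 + max prev g
    | none => st.2.1),
   some g)

-- "sum of f over consecutive pairs of (p :: gs)"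
def pvPairFold (f : Int → Int → Int) : Int → List Int → Int
  | _, [] => 0
  | p, g :: gs => f p g + pvPairFold f g gs

def pvLast : Int → List Int → Int
  | p, [] => p
  | _, g :: gs => pvLast g gs

theorem pvFoldInv (gs : List Int) : ∀ (t m p : Int),
    gs.foldl pvStep (t, m, some p) = (t + gs.sum, m + pvPairFold max p gs, some (pvLast p gs)) := by
  induction gs with
  | nil => intro t m p; simp [pvPairFold, pvLast]
  | cons g gs ih =>
    intro t m p
    simp only [List.foldl_cons, pvStep, List.sum_cons, pvPairFold, pvLast]
    rw [ih]
    refine Prod.ext (by ring) (Prod.ext (by ring) rfl)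

theorem pvPairFold_range (f : Int → Int → Int) (G : Nat → Int) : ∀ (m a : Nat),
    pvPairFold f (G a) ((List.range m).map (fun k => G (a + 1 + k)))
      = ((List.range m).map (fun k => f (G (a + k)) (G (a + k + 1)))).sum := by
  intro m
  induction m with
  | zero => intro a; simp [pvPairFold]
  | succ m ih =>
    intro a
    rw [List.range_succ_eq_map, List.map_cons, List.map_map, List.map_cons, List.map_map,
      List.sum_cons]
    simp only [pvPairFold]
    have e1 : ((fun k => G (a + 1 + k)) ∘ Nat.succ) = (fun k => G ((a + 1) + 1 + k)) := by
      funext k; simp only [Function.comp]; congr 1; omega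
    have e2 : ((fun k => f (G (a + k)) (G (a + k + 1))) ∘ Nat.succ)
        = (fun k => f (G ((a + 1) + k)) (G ((a + 1) + k + 1))) := by
      funext k; simp only [Function.comp]
      congr 2 <;> omega
    rw [e1, e2, ih (a + 1)]
    norm_num

theorem pvSumShift (G : Nat → Int) : ∀ (m : Nat),
    ((List.range m).map (fun k => G k + G (k + 1))).sum
      = 2 * ((List.range (m + 1)).map G).sum - G 0 - G m := by
  intro m
  induction m with
  | zero => simp [List.range_one]; ring
  | succ m ih =>
    rw [List.range_succ, List.map_append, List.sum_append, ih,
      show m + 1 + 1 = (m + 1) + 1 from rfl,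
      List.range_succ (n := m + 1), List.map_append, List.sum_append]
    simp
    ring

theorem pvSumMinMax (G : Nat → Int) (xs : List Nat) :
    (xs.map (fun k => min (G k) (G (k+1)))).sum + (xs.map (fun k => max (G k) (G (k+1)))).sum
      = (xs.map (fun k => G k + G (k+1))).sum := by
  induction xs with
  | nil => simp
  | cons x xs ih =>
    simp only [List.map_cons, List.sum_cons]
    have h := min_add_max (G x) (G (x+1))
    linarith

-- ===== VERDICT (by name: the statement is the Claim_ definition above) =====

theorem func_spec : Claim_equal_func := by
  intro l _ hpre
  unfold Spec_func
  by_cases hnil : l = []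
  · subst hnil; decide
  · have hn : 2 ≤ l.length := by
      have h1 : 0 < l.length := List.length_pos_iff.mpr hnil
      have h2 : l.length ≠ 1 := hpre
      omega
    have hA : func l = ((PySem.List.pyRange 0 (l.length:Int) 1).map (fun i =>
        if i = 0 then |PySem.List.pyGetD l i 0 - PySem.List.pyGetD l (i + 1) 0|
        else if i = (l.length : Int) - 1 then |PySem.List.pyGetD l i 0 - PySem.List.pyGetD l (i - 1) 0|
        else min |PySem.List.pyGetD l i 0 - PySem.List.pyGetD l (i - 1) 0|
               |PySem.List.pyGetD l i 0 - PySem.List.pyGetD l (i + 1) 0|)).sum := by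
      unfold func
      rw [show (fun res i =>
        if i = 0 then res + |PySem.List.pyGetD l i 0 - PySem.List.pyGetD l (i + 1) 0|
        else if i = (l.length : Int) - 1 then res + |PySem.List.pyGetD l i 0 - PySem.List.pyGetD l (i - 1) 0|
        else res + min |PySem.List.pyGetD l i 0 - PySem.List.pyGetD l (i - 1) 0|
               |PySem.List.pyGetD l i 0 - PySem.List.pyGetD l (i + 1) 0|) = (fun res i => res +
        (if i = 0 then |PySem.List.pyGetD l i 0 - PySem.List.pyGetD l (i + 1) 0|
        else if i = (l.length : Int) - 1 then |PySem.List.pyGetD l i 0 - PySem.List.pyGetD l (i - 1) 0|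
        else min |PySem.List.pyGetD l i 0 - PySem.List.pyGetD l (i - 1) 0|
               |PySem.List.pyGetD l i 0 - PySem.List.pyGetD l (i + 1) 0|)) from by
        funext res i; split_ifs <;> rfl]
      rw [PySem.List.foldl_add]
      ring
    set n := l.length with hndef
    set G : Nat → Int := fun k => |l.getD (k+1) 0 - l.getD k 0| with hG
    -- ===== A's value in terms of G =====
    have hsplit : List.range n = 0 :: ((List.range (n-2)).map Nat.succ ++ [n-1]) := by
      obtain ⟨m, hm⟩ : ∃ m, n = m + 2 := ⟨n - 2, by omega⟩
      rw [hm]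
      rw [show m + 2 - 2 = m from by omega, show m + 2 - 1 = m + 1 from by omega]
      rw [List.range_succ, List.range_succ_eq_map]
      rfl
    have h0 : (if ((0:Int) + ((0:Nat):Int)) = 0 then
          |PySem.List.pyGetD l ((0:Int) + ((0:Nat):Int)) 0 - PySem.List.pyGetD l ((0:Int) + ((0:Nat):Int) + 1) 0|
        else if ((0:Int) + ((0:Nat):Int)) = (n:Int) - 1 then
          |PySem.List.pyGetD l ((0:Int) + ((0:Nat):Int)) 0 - PySem.List.pyGetD l ((0:Int) + ((0:Nat):Int) - 1) 0|
        else min |PySem.List.pyGetD l ((0:Int) + ((0:Nat):Int)) 0 - PySem.List.pyGetD l ((0:Int) + ((0:Nat):Int) - 1) 0|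
               |PySem.List.pyGetD l ((0:Int) + ((0:Nat):Int)) 0 - PySem.List.pyGetD l ((0:Int) + ((0:Nat):Int) + 1) 0|) = G 0 := by
      rw [show (0:Int) + ((0:Nat):Int) = 0 from by norm_num, if_pos rfl]
      have e1 : (0:Int) + 1 = ((1 : Nat) : Int) := by norm_num
      rw [e1, show (0:Int) = ((0:Nat):Int) from rfl, PySem.List.pyGetD_natCast, PySem.List.pyGetD_natCast]
      simp only [hG]
      rw [abs_sub_comm]
      norm_num
    have hlast : (if ((0:Int) + ((n-1:Nat):Int)) = 0 then
          |PySem.List.pyGetD l ((0:Int) + ((n-1:Nat):Int)) 0 - PySem.List.pyGetD l ((0:Int) + ((n-1:Nat):Int) + 1) 0|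
        else if ((0:Int) + ((n-1:Nat):Int)) = (n:Int) - 1 then
          |PySem.List.pyGetD l ((0:Int) + ((n-1:Nat):Int)) 0 - PySem.List.pyGetD l ((0:Int) + ((n-1:Nat):Int) - 1) 0|
        else min |PySem.List.pyGetD l ((0:Int) + ((n-1:Nat):Int)) 0 - PySem.List.pyGetD l ((0:Int) + ((n-1:Nat):Int) - 1) 0|
               |PySem.List.pyGetD l ((0:Int) + ((n-1:Nat):Int)) 0 - PySem.List.pyGetD l ((0:Int) + ((n-1:Nat):Int) + 1) 0|) = G (n-2) := by
      rw [show (0:Int) + ((n-1:Nat):Int) = ((n-1:Nat):Int) from by ring]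
      rw [if_neg (by omega), if_pos (by omega)]
      rw [show ((n-1:Nat):Int) - 1 = ((n-2:Nat):Int) from by omega]
      rw [PySem.List.pyGetD_natCast, PySem.List.pyGetD_natCast]
      simp only [hG]
      rw [show n - 2 + 1 = n - 1 from by omega]
    have hmid : ∀ k ∈ List.range (n-2),
        (if ((0:Int) + ((k+1 : Nat):Int)) = 0 then
          |PySem.List.pyGetD l ((0:Int) + ((k+1:Nat):Int)) 0 - PySem.List.pyGetD l ((0:Int) + ((k+1:Nat):Int) + 1) 0|
        else if ((0:Int) + ((k+1:Nat):Int)) = (n:Int) - 1 then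
          |PySem.List.pyGetD l ((0:Int) + ((k+1:Nat):Int)) 0 - PySem.List.pyGetD l ((0:Int) + ((k+1:Nat):Int) - 1) 0|
        else min |PySem.List.pyGetD l ((0:Int) + ((k+1:Nat):Int)) 0 - PySem.List.pyGetD l ((0:Int) + ((k+1:Nat):Int) - 1) 0|
               |PySem.List.pyGetD l ((0:Int) + ((k+1:Nat):Int)) 0 - PySem.List.pyGetD l ((0:Int) + ((k+1:Nat):Int) + 1) 0|)
        = min (G k) (G (k+1)) := by
      intro k hk
      have hk' : k < n - 2 := List.mem_range.mp hk
      rw [show (0:Int) + ((k+1 : Nat):Int) = ((k+1:Nat):Int) from by ring]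
      rw [if_neg (by omega), if_neg (by omega)]
      rw [show ((k+1:Nat):Int) - 1 = ((k:Nat):Int) from by omega,
          show ((k+1:Nat):Int) + 1 = ((k+2:Nat):Int) from by omega]
      rw [PySem.List.pyGetD_natCast, PySem.List.pyGetD_natCast, PySem.List.pyGetD_natCast]
      simp only [hG]
      congr 1
      rw [abs_sub_comm]
    have hAval : func l = G 0 + G (n-2)
        + ((List.range (n-2)).map (fun k => min (G k) (G (k+1)))).sum := by
      rw [hA, PySem.List.pyRange_one]
      have ht : ((n : Int) - 0).toNat = n := by omega
      rw [ht, List.map_map, hsplit]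
      simp only [List.map_cons, List.map_append, List.map_map, List.sum_cons,
        List.sum_append, List.sum_nil, List.map_nil, Function.comp]
      rw [h0]
      simp only [Function.comp_def, Nat.succ_eq_add_one]
      rw [List.map_congr_left hmid, hlast]
      ring
    -- ===== B's value in terms of G =====
    have hzipmap : (l.zip l.tail).map (fun p : Int × Int => |p.2 - p.1|)
        = (List.range (n-1)).map G := by
      apply List.ext_getElem
      · simp [List.length_zip, List.length_tail]; omega
      · intro k h1 h2
        simp only [List.getElem_map, List.getElem_zip, List.getElem_tail, List.getElem_range]
        have hk : k < n - 1 := by simpa using h2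
        simp only [hG]
        rw [List.getD_eq_getElem _ _ (by omega), List.getD_eq_getElem _ _ (by omega)]
    have hDcons : (List.range (n-1)).map G
        = G 0 :: (List.range (n-2)).map (fun k => G (0 + 1 + k)) := by
      rw [show n - 1 = (n-2) + 1 from by omega, List.range_succ_eq_map, List.map_cons,
        List.map_map]
      refine congrArg _ (List.map_congr_left ?_)
      intro k _
      simp only [Function.comp]; congr 1; omega
    have hB : func_alt l = 2 * (0 + G 0 + ((List.range (n-2)).map (fun k => G (0 + 1 + k))).sum)
        - (0 + pvPairFold max (G 0) ((List.range (n-2)).map (fun k => G (0 + 1 + k)))) := by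
      show 2 * ((l.zip (PySem.List.slice l (some 1) none)).foldl
        (fun st p =>
          let g := |p.2 - p.1|
          (st.1 + g,
           (match st.2.2 with
            | some prev => st.2.1 + max prev g
            | none => st.2.1),
           some g)) ((0:Int), (0:Int), (none : Option Int))).1
        - ((l.zip (PySem.List.slice l (some 1) none)).foldl
        (fun st p =>
          let g := |p.2 - p.1|
          (st.1 + g,
           (match st.2.2 with
            | some prev => st.2.1 + max prev g
            | none => st.2.1),
           some g)) ((0:Int), (0:Int), (none : Option Int))).2.1 = _
      rw [PySem.List.slice_from_one]
      rw [show (fun (st : Int × Int × Option Int) (p : Int × Int) =>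
          let g := |p.2 - p.1|
          (st.1 + g,
           (match st.2.2 with
            | some prev => st.2.1 + max prev g
            | none => st.2.1),
           some g)) = (fun st p => pvStep st |p.2 - p.1|) from rfl]
      rw [← List.foldl_map]
      rw [hzipmap, hDcons, List.foldl_cons,
        show pvStep ((0:Int), (0:Int), (none : Option Int)) (G 0) = (0 + G 0, 0, some (G 0)) from rfl,
        pvFoldInv]
    -- ===== the algebraic identity connecting them =====
    have hPF : pvPairFold max (G 0) ((List.range (n-2)).map (fun k => G (0 + 1 + k)))
        = ((List.range (n-2)).map (fun k => max (G k) (G (k+1)))).sum := by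
      rw [pvPairFold_range max G (n-2) 0]
      refine congrArg List.sum (List.map_congr_left ?_)
      intro k _
      simp
    have htail : ((List.range (n-2)).map (fun k => G (0 + 1 + k))).sum
        = ((List.range (n-1)).map G).sum - G 0 := by
      rw [hDcons, List.sum_cons]; ring
    have hshift : ((List.range (n-2)).map (fun k => min (G k) (G (k+1)))).sum
        + ((List.range (n-2)).map (fun k => max (G k) (G (k+1)))).sum
        = 2 * ((List.range (n-1)).map G).sum - G 0 - G (n-2) := by
      rw [pvSumMinMax G (List.range (n-2)), pvSumShift G (n-2),
        show n - 2 + 1 = n - 1 from by omega]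
    rw [hAval, hB, hPF, htail]
    linarith [hshift]
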